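-- pv_equiv track=rewrite | github.com/Soham0047/AegisCI | validator/runner.py | _infer_mode_from_patch
-- ===== SOURCE A (Python) =====
-- def _extract_paths_from_patch(patch_text: str) -> list[str]:
--     paths: set[str] = set()
--     for line in patch_text.splitlines():
--         if line.startswith("diff --git "):
--             parts = line.split()
--             if len(parts) >= 4:
--                 path = parts[3]
--                 if path.startswith("b/"):
--                     path = path[2:]
--                 paths.add(path)
--         elif line.startswith("+++ "):
--             path = line[4:].strip()
--             if path.startswith("b/"):
--                 path = path[2:]
--             if path and path != "/dev/null":
--                 paths.add(path)
--     return sorted(paths)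
--
-- def _infer_mode_from_patch(patch_text: str) -> str:
--     paths = _extract_paths_from_patch(patch_text)
--     if not paths:
--         return "auto"
--
--     has_py = any(path.endswith(".py") for path in paths)
--     has_ts = any(path.endswith(ext) for path in paths for ext in (".js", ".jsx", ".ts", ".tsx"))
--
--     if has_py and has_ts:
--         return "both"
--     if has_py:
--         return "python"
--     if has_ts:
--         return "ts"
--     return "auto"
-- ===== SOURCE B (Python) =====
-- _EXTMASK = ((".py", 1), (".js", 2), (".jsx", 2), (".ts", 2), (".tsx", 2))
--
--
-- def _classify(line: str):
--     """Mask a single patch line contributes: None if it names no path,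
--     else 1 (python file), 2 (js/ts file) or 0 (other file)."""
--     if line.startswith("diff --git "):
--         parts = line.split()
--         if len(parts) < 4:
--             return None
--         path = parts[3]
--         if path.startswith("b/"):
--             path = path[2:]
--     elif line.startswith("+++ "):
--         path = line[4:].strip()
--         if path.startswith("b/"):
--             path = path[2:]
--         if not path or path == "/dev/null":
--             return None
--     else:
--         return None
--     for ext, m in _EXTMASK:
--         if path.endswith(ext):
--             return m
--     return 0
--
--
-- def _infer_mode_from_patch(patch_text: str) -> str:
--     mask = 0
--     for line in patch_text.splitlines():
--         c = _classify(line)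
--         if c:
--             mask |= c
--             if mask == 3:
--                 return "both"
--     if mask == 1:
--         return "python"
--     if mask == 2:
--         return "ts"
--     return "auto"
-- ===== Notes on version B (the rewrite author's own statement) =====
-- stated objective: simpler
-- what changed: Replaces A's build-set/dedup/sort plus two any() scans with a single early-exiting pass that ORs a per-line 2-bit extension mask into an accumulator and decodes the final mask, never materialising any path collection.
import Mathlib
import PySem

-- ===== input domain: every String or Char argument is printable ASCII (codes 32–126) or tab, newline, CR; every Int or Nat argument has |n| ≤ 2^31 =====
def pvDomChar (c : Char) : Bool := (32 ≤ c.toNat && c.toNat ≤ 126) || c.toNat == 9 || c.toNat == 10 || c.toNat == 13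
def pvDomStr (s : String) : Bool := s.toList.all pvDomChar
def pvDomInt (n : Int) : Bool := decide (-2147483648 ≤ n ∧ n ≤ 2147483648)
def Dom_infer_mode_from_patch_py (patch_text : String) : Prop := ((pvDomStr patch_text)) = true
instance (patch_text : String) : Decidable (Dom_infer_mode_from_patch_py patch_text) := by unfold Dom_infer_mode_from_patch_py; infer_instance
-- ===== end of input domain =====

-- B replaces A's build-set/dedup/sort plus two any() scans with one early-exiting pass that
-- ORs a per-line 2-bit extension mask into an accumulator and decodes it (objective: simpler).

-- ===== PORT A =====
-- _extract_paths_from_patch: builds a set of paths, returns sorted(paths)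
def extract_paths_from_patch (patch_text : String) : List String :=
  let paths : PySem.Set String :=
    (PySem.Str.splitlines patch_text).foldl (fun paths line =>
      if PySem.Str.startswith line "diff --git " then
        let parts := PySem.Str.split₀ line
        if 4 ≤ parts.length then
          let path := parts.getD 3 ""
          let path := if PySem.Str.startswith path "b/" then PySem.Str.slice path (some 2) none else path
          PySem.Set.add paths path
        else paths
      else if PySem.Str.startswith line "+++ " then
        let path := PySem.Str.strip (PySem.Str.slice line (some 4) none)
        let path := if PySem.Str.startswith path "b/" then PySem.Str.slice path (some 2) none else path
        if path ≠ "" ∧ path ≠ "/dev/null" then PySem.Set.add paths path else paths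
      else paths) PySem.Set.empty
  PySem.List.sorted paths (fun x => x) false

def infer_mode_from_patch_py (patch_text : String) : String :=
  let paths := extract_paths_from_patch patch_text
  if paths.isEmpty then "auto"
  else
    let has_py := paths.any (fun path => PySem.Str.endswith path ".py")
    let has_ts := paths.any (fun path => [".js", ".jsx", ".ts", ".tsx"].any (fun ext => PySem.Str.endswith path ext))
    if has_py && has_ts then "both"
    else if has_py then "python"
    else if has_ts then "ts"
    else "auto"

-- ===== PORT B =====
-- _EXTMASK: extension → 2-bit mask
def extMaskTable : List (String × Int) := [(".py", 1), (".js", 2), (".jsx", 2), (".ts", 2), (".tsx", 2)]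

-- the trailing "for ext, m in _EXTMASK: if path.endswith(ext): return m / return 0" loop
def extMask (path : String) : Int :=
  match extMaskTable.find? (fun em => PySem.Str.endswith path em.1) with
  | some em => em.2
  | none => 0

-- _classify: the mask one patch line contributes, none if it names no path
def classifyLine (line : String) : Option Int :=
  if PySem.Str.startswith line "diff --git " then
    let parts := PySem.Str.split₀ line
    if parts.length < 4 then none
    else
      let path := parts.getD 3 ""
      let path := if PySem.Str.startswith path "b/" then PySem.Str.slice path (some 2) none else path
      some (extMask path)
  else if PySem.Str.startswith line "+++ " then
    let path := PySem.Str.strip (PySem.Str.slice line (some 4) none)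
    let path := if PySem.Str.startswith path "b/" then PySem.Str.slice path (some 2) none else path
    if path = "" ∨ path = "/dev/null" then none
    else some (extMask path)
  else none

-- the main loop of B: early return "both" once both bits are set, else decode the final mask
def inferGo : List String → Int → String
  | [], mask => if mask = 1 then "python" else if mask = 2 then "ts" else "auto"
  | line :: rest, mask =>
    match classifyLine line with
    | none => inferGo rest mask
    | some c =>
      if c ≠ 0 then
        let mask := PySem.Int.bor mask c
        if mask = 3 then "both" else inferGo rest mask
      else inferGo rest mask

def infer_mode_from_patch_py_alt (patch_text : String) : String :=
  inferGo (PySem.Str.splitlines patch_text) 0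

-- ===== PRECONDITION & SPEC =====
def Spec_infer_mode_from_patch_py (patch_text : String) (out : String) : Prop := out = infer_mode_from_patch_py_alt patch_text
instance (patch_text : String) (out : String) : Decidable (Spec_infer_mode_from_patch_py patch_text out) := by unfold Spec_infer_mode_from_patch_py; infer_instance

-- ===== CLAIM =====
def Claim_equal_infer_mode_from_patch_py : Prop := ∀ (patch_text : String), Dom_infer_mode_from_patch_py patch_text → Spec_infer_mode_from_patch_py patch_text (infer_mode_from_patch_py patch_text)

-- ===== LEMMAS AND PROOFS =====

-- the path a single line contributes in A's fold, if any
def pathOfLine (line : String) : Option String :=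
  if PySem.Str.startswith line "diff --git " then
    let parts := PySem.Str.split₀ line
    if 4 ≤ parts.length then
      let path := parts.getD 3 ""
      some (if PySem.Str.startswith path "b/" then PySem.Str.slice path (some 2) none else path)
    else none
  else if PySem.Str.startswith line "+++ " then
    let path := PySem.Str.strip (PySem.Str.slice line (some 4) none)
    let path := if PySem.Str.startswith path "b/" then PySem.Str.slice path (some 2) none else path
    if path ≠ "" ∧ path ≠ "/dev/null" then some path else none
  else none

def pyFlag (l : String) : Bool :=
  match pathOfLine l with
  | some p => PySem.Str.endswith p ".py"
  | none => false

def tsFlag (l : String) : Bool :=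
  match pathOfLine l with
  | some p => [".js", ".jsx", ".ts", ".tsx"].any (fun ext => PySem.Str.endswith p ext)
  | none => false

def toMask (a b : Bool) : Int := (if a then 1 else 0) + (if b then 2 else 0)

def render (a b : Bool) : String :=
  if a && b then "both" else if a then "python" else if b then "ts" else "auto"

-- A's per-line set update is "add pathOfLine's result, if any"
theorem stepA_funext :
    (fun (paths : PySem.Set String) (line : String) =>
      if PySem.Str.startswith line "diff --git " then
        let parts := PySem.Str.split₀ line
        if 4 ≤ parts.length then
          let path := parts.getD 3 ""
          let path := if PySem.Str.startswith path "b/" then PySem.Str.slice path (some 2) none else path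
          PySem.Set.add paths path
        else paths
      else if PySem.Str.startswith line "+++ " then
        let path := PySem.Str.strip (PySem.Str.slice line (some 4) none)
        let path := if PySem.Str.startswith path "b/" then PySem.Str.slice path (some 2) none else path
        if path ≠ "" ∧ path ≠ "/dev/null" then PySem.Set.add paths path else paths
      else paths)
    = (fun (paths : PySem.Set String) (line : String) =>
       match pathOfLine line with
       | some p => PySem.Set.add paths p
       | none => paths) := by
  funext paths line
  unfold pathOfLine
  dsimp only
  split_ifs <;> rfl

theorem mem_foldA (lines : List String) (s : PySem.Set String) (x : String) :
    (x ∈ lines.foldl (fun (paths : PySem.Set String) (line : String) =>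
       match pathOfLine line with
       | some p => PySem.Set.add paths p
       | none => paths) s)
    ↔ (x ∈ s ∨ ∃ l ∈ lines, pathOfLine l = some x) := by
  induction lines generalizing s with
  | nil => simp
  | cons l ls ih =>
    rw [List.foldl_cons, ih]
    cases h : pathOfLine l with
    | none =>
      simp only [List.mem_cons]
      constructor
      · rintro (hs | ⟨m, hm, he⟩)
        · exact Or.inl hs
        · exact Or.inr ⟨m, Or.inr hm, he⟩
      · rintro (hs | ⟨m, (rfl | hm), he⟩)
        · exact Or.inl hs
        · exact absurd he (by simp [h])
        · exact Or.inr ⟨m, hm, he⟩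
    | some p =>
      rw [PySem.Set.mem_add]
      simp only [List.mem_cons]
      constructor
      · rintro ((hs | rfl) | ⟨m, hm, he⟩)
        · exact Or.inl hs
        · exact Or.inr ⟨l, Or.inl rfl, by simp [h]⟩
        · exact Or.inr ⟨m, Or.inr hm, he⟩
      · rintro (hs | ⟨m, (rfl | hm), he⟩)
        · exact Or.inl (Or.inl hs)
        · rw [h] at he; exact Or.inl (Or.inr (by injection he with he; exact he.symm))
        · exact Or.inr ⟨m, hm, he⟩

theorem memA_iff (patch_text : String) (x : String) :
    x ∈ extract_paths_from_patch patch_text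
    ↔ ∃ l ∈ PySem.Str.splitlines patch_text, pathOfLine l = some x := by
  unfold extract_paths_from_patch
  rw [stepA_funext, PySem.List.mem_sorted, mem_foldA]
  simp [PySem.Set.empty]

theorem anyA_eq (patch_text : String) (f : String → Bool) (g : String → Bool)
    (hg : ∀ l, g l = match pathOfLine l with | some p => f p | none => false) :
    (extract_paths_from_patch patch_text).any f = (PySem.Str.splitlines patch_text).any g := by
  rcases h : (extract_paths_from_patch patch_text).any f with _ | _
  · symm
    rw [List.any_eq_false] at h ⊢
    intro l hl
    rw [hg l]
    cases hp : pathOfLine l with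
    | none => simp
    | some p => exact h p ((memA_iff patch_text p).mpr ⟨l, hl, hp⟩)
  · symm
    rw [List.any_eq_true] at h ⊢
    obtain ⟨p, hp, hf⟩ := h
    obtain ⟨l, hl, he⟩ := (memA_iff patch_text p).mp hp
    exact ⟨l, hl, by rw [hg l, he]; exact hf⟩

theorem emptyA_iff (patch_text : String)
    (h : (extract_paths_from_patch patch_text).isEmpty = true) :
    ∀ l ∈ PySem.Str.splitlines patch_text, pathOfLine l = none := by
  rw [List.isEmpty_iff] at h
  intro l hl
  cases he : pathOfLine l with
  | none => rfl
  | some p => exact absurd ((memA_iff patch_text p).mpr ⟨l, hl, he⟩) (by simp [h])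

theorem emptyA_flags (patch_text : String)
    (h : (extract_paths_from_patch patch_text).isEmpty = true) :
    (PySem.Str.splitlines patch_text).any pyFlag = false
    ∧ (PySem.Str.splitlines patch_text).any tsFlag = false := by
  have hn := emptyA_iff patch_text h
  constructor <;> (rw [List.any_eq_false]; intro l hl)
  · simp [pyFlag, hn l hl]
  · simp [tsFlag, hn l hl]

-- a path cannot end with ".py" and also with a js/ts extension
theorem py_not_ts (p : String) (h : PySem.Str.endswith p ".py" = true) :
    ([".js", ".jsx", ".ts", ".tsx"].any (fun ext => PySem.Str.endswith p ext)) = false := by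
  have key : ∀ e : String, ¬ (e.toList <:+ ".py".toList) → ¬ (".py".toList <:+ e.toList) →
      PySem.Str.endswith p e = false := by
    intro e he1 he2
    rw [Bool.eq_false_iff]
    intro h2
    rw [PySem.Str.endswith_eq, PySem.Chars.endswith_iff] at h h2
    rcases List.suffix_or_suffix_of_suffix h2 h with hs | hs
    · exact he1 hs
    · exact he2 hs
  simp only [List.any_cons, List.any_nil]
  rw [key ".js" (by decide) (by decide), key ".jsx" (by decide) (by decide),
      key ".ts" (by decide) (by decide), key ".tsx" (by decide) (by decide)]
  rfl

-- helper for classify_eq: the complementary +++-line conditions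
theorem ite_not_and (q : String) :
    (if q = "" ∨ q = "/dev/null" then (none : Option Int) else some (extMask q))
    = Option.map extMask (if q ≠ "" ∧ q ≠ "/dev/null" then some q else none) := by
  by_cases h1 : q = "" <;> by_cases h2 : q = "/dev/null" <;> simp [h1, h2]

-- classifyLine computes extMask of A's per-line path
theorem classify_eq (l : String) : classifyLine l = (pathOfLine l).map extMask := by
  unfold classifyLine pathOfLine
  by_cases hd : PySem.Str.startswith l "diff --git " = true
  · rw [if_pos hd, if_pos hd]
    dsimp only
    by_cases hl : (PySem.Str.split₀ l).length < 4
    · have h4 : ¬ 4 ≤ (PySem.Str.split₀ l).length := by omega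
      rw [if_pos hl, if_neg h4]
      rfl
    · have h4 : 4 ≤ (PySem.Str.split₀ l).length := by omega
      rw [if_neg hl, if_pos h4]
      rfl
  · rw [if_neg hd, if_neg hd]
    by_cases hpl : PySem.Str.startswith l "+++ " = true
    · rw [if_pos hpl, if_pos hpl]
      dsimp only
      exact ite_not_and _
    · rw [if_neg hpl, if_neg hpl]
      rfl

-- the mask of a line in terms of the two flags
theorem maskOf_toMask (l : String) (p : String) (hp : pathOfLine l = some p) :
    extMask p = toMask (pyFlag l) (tsFlag l) := by
  have hpy : pyFlag l = PySem.Str.endswith p ".py" := by unfold pyFlag; rw [hp]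
  have hts : tsFlag l = [".js", ".jsx", ".ts", ".tsx"].any (fun ext => PySem.Str.endswith p ext) := by
    unfold tsFlag; rw [hp]
  rw [hpy, hts]
  unfold extMask extMaskTable
  cases h1 : PySem.Str.endswith p ".py" with
  | true =>
    rw [py_not_ts p h1]
    simp only [List.find?, h1]
    rfl
  | false =>
    cases h2 : PySem.Str.endswith p ".js" <;>
    cases h3 : PySem.Str.endswith p ".jsx" <;>
    cases h4 : PySem.Str.endswith p ".ts" <;>
    cases h5 : PySem.Str.endswith p ".tsx" <;>
    simp only [List.find?, List.any_cons, List.any_nil, h1, h2, h3, h4, h5] <;>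
    decide

theorem bor_toMask (a b c d : Bool) :
    PySem.Int.bor (toMask a b) (toMask c d) = toMask (a || c) (b || d) := by
  cases a <;> cases b <;> cases c <;> cases d <;> decide

theorem inferGo_eq (lines : List String) (a b : Bool) (hab : ¬(a = true ∧ b = true)) :
    inferGo lines (toMask a b)
    = render (a || lines.any pyFlag) (b || lines.any tsFlag) := by
  induction lines generalizing a b with
  | nil =>
    cases a <;> cases b <;> first
    | rfl
    | exact absurd ⟨rfl, rfl⟩ hab
  | cons l ls ih =>
    rw [List.any_cons, List.any_cons, ← Bool.or_assoc, ← Bool.or_assoc]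
    show inferGo (l :: ls) (toMask a b) = _
    unfold inferGo
    rw [classify_eq]
    cases hp : pathOfLine l with
    | none =>
      have hpy : pyFlag l = false := by simp [pyFlag, hp]
      have hts : tsFlag l = false := by simp [tsFlag, hp]
      rw [hpy, hts, Bool.or_false, Bool.or_false]
      exact ih a b hab
    | some p =>
      simp only [Option.map_some]
      rw [maskOf_toMask l p hp, bor_toMask]
      by_cases hc : toMask (pyFlag l) (tsFlag l) = 0
      · have hz : pyFlag l = false ∧ tsFlag l = false := by
          revert hc; unfold toMask
          cases pyFlag l <;> cases tsFlag l <;> simp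
        rw [if_neg (by simp [hc]), hz.1, hz.2, Bool.or_false, Bool.or_false]
        exact ih a b hab
      · rw [if_pos hc]
        by_cases h3 : toMask (a || pyFlag l) (b || tsFlag l) = 3
        · have habt : (a || pyFlag l) = true ∧ (b || tsFlag l) = true := by
            revert h3; unfold toMask
            cases a || pyFlag l <;> cases b || tsFlag l <;> simp
          rw [if_pos h3, habt.1, habt.2]
          simp [render]
        · have hab' : ¬((a || pyFlag l) = true ∧ (b || tsFlag l) = true) := by
            intro hcon
            exact h3 (by rw [hcon.1, hcon.2]; rfl)
          rw [if_neg h3]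
          exact ih (a || pyFlag l) (b || tsFlag l) hab'

-- ===== VERDICT =====
theorem infer_mode_from_patch_py_spec : Claim_equal_infer_mode_from_patch_py := by
  intro patch_text _
  unfold Spec_infer_mode_from_patch_py infer_mode_from_patch_py infer_mode_from_patch_py_alt
  have h0 : (0 : Int) = toMask false false := rfl
  rw [h0, inferGo_eq _ false false (by simp)]
  simp only [Bool.false_or]
  rcases hE : (extract_paths_from_patch patch_text).isEmpty with _ | _
  · rw [if_neg (by decide : ¬ (false = true))]
    rw [anyA_eq patch_text (fun path => PySem.Str.endswith path ".py") pyFlag (fun l => rfl),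
        anyA_eq patch_text (fun path => [".js", ".jsx", ".ts", ".tsx"].any (fun ext => PySem.Str.endswith path ext)) tsFlag (fun l => rfl)]
    rfl
  · obtain ⟨h1, h2⟩ := emptyA_flags patch_text hE
    rw [if_pos rfl, h1, h2]
    rfl
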